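-- pv_equiv track=rewrite | github.com/notshrxy/HEY-XL | Main Modules (Backend)/Current/module_voice_input_simple.py | get_critical_devices
-- ===== SOURCE A (Python) =====
-- def get_critical_devices(devices: list) -> list:
--     """Filter and prioritize the most critical input devices (limit to 5)."""
--     critical_devices = []
--
--     # Priority keywords for better devices
--     priority_keywords = [
--         "external", "headset", "usb", "bluetooth", "wireless",
--         "webcam", "camera", "logitech", "blue", "jabra"
--     ]
--
--     # First pass: Find devices with priority keywords
--     for device in devices:
--         device_lower = device.lower()
--         for keyword in priority_keywords:
--             if keyword in device_lower and "output" not in device_lower: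
--                 critical_devices.append(device)
--                 break
--         if len(critical_devices) >= 5:
--             break
--
--     # Second pass: Add remaining microphone devices if we don't have 5 yet
--     for device in devices:
--         if len(critical_devices) >= 5:
--             break
--         device_lower = device.lower()
--         if ("microphone" in device_lower and
--             "array" not in device_lower and
--             "output" not in device_lower and
--             device not in critical_devices):
--             critical_devices.append(device)
--
--     # Third pass: Add any remaining input devices if we still don't have 5
--     for device in devices:
--         if len(critical_devices) >= 5:
--             break
--         device_lower = device.lower()
--         if ("input" in device_lower and
--             "output" not in device_lower and
--             device not in critical_devices):
--             critical_devices.append(device)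
--
--     # If still less than 5, add the first few remaining devices
--     for device in devices:
--         if len(critical_devices) >= 5:
--             break
--         if device not in critical_devices:
--             critical_devices.append(device)
--
--     return critical_devices[:5]  # Ensure we only return max 5 devices
-- ===== SOURCE B (Python) =====
-- def get_critical_devices(devices: list) -> list:
--     """Filter and prioritize the most critical input devices (limit to 5)."""
--     priority_keywords = [
--         "external", "headset", "usb", "bluetooth", "wireless",
--         "webcam", "camera", "logitech", "blue", "jabra"
--     ]
--     b1, b2, b3, b4 = [], [], [], []
--     for device in devices:
--         dl = device.lower()
--         if "output" not in dl and any(k in dl for k in priority_keywords):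
--             b1.append(device)
--         elif "microphone" in dl and "array" not in dl and "output" not in dl:
--             b2.append(device)
--         elif "input" in dl and "output" not in dl:
--             b3.append(device)
--         else:
--             b4.append(device)
--     result = list(b1)  # pass 1 keeps duplicates
--     seen = set(result)
--     for device in b2 + b3 + b4:
--         if device not in seen:
--             result.append(device)
--             seen.add(device)
--     return result[:5]
-- ===== Notes on version B (the rewrite author's own statement) =====
-- stated objective: alternative
-- what changed: Four guarded passes over the device list with early >=5 breaks are replaced by one classification pass into four priority buckets followed by a single seen-set dedup-append of the concatenated buckets and a final take-5 slice.
import Mathlib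
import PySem

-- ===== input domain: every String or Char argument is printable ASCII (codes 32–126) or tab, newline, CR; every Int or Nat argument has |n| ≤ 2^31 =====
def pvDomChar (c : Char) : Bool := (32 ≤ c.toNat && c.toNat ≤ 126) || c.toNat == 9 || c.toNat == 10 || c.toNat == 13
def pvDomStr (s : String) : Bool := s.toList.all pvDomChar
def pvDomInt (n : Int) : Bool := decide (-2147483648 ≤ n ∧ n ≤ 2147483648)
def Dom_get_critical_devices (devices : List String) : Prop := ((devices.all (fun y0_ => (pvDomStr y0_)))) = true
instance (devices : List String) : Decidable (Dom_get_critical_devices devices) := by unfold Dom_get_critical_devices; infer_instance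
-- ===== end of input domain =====

-- B replaces A's four guarded passes (with >=5 early breaks) by one bucket-classification
-- pass plus a single dedup-append and a final take-5; objective: alternative decomposition.

-- ===== PORT A =====
-- shared predicates: the three device conditions of the Python source
def pvKeywords : List String :=
  ["external", "headset", "usb", "bluetooth", "wireless",
   "webcam", "camera", "logitech", "blue", "jabra"]

def pvC1 (d : String) : Bool :=
  pvKeywords.any (fun k => PySem.Str.isIn k (PySem.Str.lower d)) &&
    !PySem.Str.isIn "output" (PySem.Str.lower d)

def pvC2 (d : String) : Bool :=
  PySem.Str.isIn "microphone" (PySem.Str.lower d) &&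
    !PySem.Str.isIn "array" (PySem.Str.lower d) &&
    !PySem.Str.isIn "output" (PySem.Str.lower d)

def pvC3 (d : String) : Bool :=
  PySem.Str.isIn "input" (PySem.Str.lower d) &&
    !PySem.Str.isIn "output" (PySem.Str.lower d)

-- first pass: append on keyword match, break once the list has ≥ 5 entries
def pvPass1 : List String → List String → List String
  | [], acc => acc
  | d :: ds, acc =>
      let acc' := if pvC1 d then acc ++ [d] else acc
      if 5 ≤ acc'.length then acc' else pvPass1 ds acc'

-- passes 2–4: break at ≥ 5 first, then append if condition holds and not already present
def pvPassDedup (c : String → Bool) : List String → List String → List String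
  | [], acc => acc
  | d :: ds, acc =>
      if 5 ≤ acc.length then acc
      else pvPassDedup c ds (if c d && !acc.contains d then acc ++ [d] else acc)

def get_critical_devices (devices : List String) : List String :=
  let a1 := pvPass1 devices []
  let a2 := pvPassDedup pvC2 devices a1
  let a3 := pvPassDedup pvC3 devices a2
  let a4 := pvPassDedup (fun _ => true) devices a3
  a4.take 5

-- ===== PORT B =====
-- one pass: classify each device into the first matching bucket
def pvBuckets : List String → List String × List String × List String × List String →
    List String × List String × List String × List String
  | [], bs => bs
  | d :: ds, (b1, b2, b3, b4) =>
      if pvC1 d then pvBuckets ds (b1 ++ [d], b2, b3, b4)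
      else if pvC2 d then pvBuckets ds (b1, b2 ++ [d], b3, b4)
      else if pvC3 d then pvBuckets ds (b1, b2, b3 ++ [d], b4)
      else pvBuckets ds (b1, b2, b3, b4 ++ [d])

-- 'for device in l: if device not in seen: result.append(device); seen.add(device)'
def pvDedupSeen : List String → List String × PySem.Set String → List String
  | [], (res, _) => res
  | d :: l, (res, seen) =>
      if PySem.Set.contains seen d then pvDedupSeen l (res, seen)
      else pvDedupSeen l (res ++ [d], PySem.Set.add seen d)

def get_critical_devices_alt (devices : List String) : List String :=
  match pvBuckets devices ([], [], [], []) with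
  | (b1, b2, b3, b4) =>
      (pvDedupSeen (b2 ++ b3 ++ b4) (b1, PySem.Set.ofList b1)).take 5

-- ===== PRECONDITION & SPEC =====
def Spec_get_critical_devices (devices : List String) (out : List String) : Prop := out = get_critical_devices_alt devices
instance (devices : List String) (out : List String) : Decidable (Spec_get_critical_devices devices out) := by unfold Spec_get_critical_devices; infer_instance

-- ===== CLAIM (what is proved, stated in full; the proofs are below) =====
def Claim_equal_get_critical_devices : Prop := ∀ (devices : List String), Dom_get_critical_devices devices → Spec_get_critical_devices devices (get_critical_devices devices)

-- ===== LEMMAS AND PROOFS =====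

-- proof vocabulary: the plain list-membership dedup-append both sides reduce to
def pvDedupAdd (acc : List String) (l : List String) : List String :=
  l.foldl (fun acc d => if acc.contains d then acc else acc ++ [d]) acc

-- B's seen-set loop computes the same result list as pvDedupAdd
theorem pvDedupSeen_eq (l : List String) :
    ∀ res (seen : PySem.Set String), (∀ x, x ∈ seen ↔ x ∈ res) →
      pvDedupSeen l (res, seen) = pvDedupAdd res l := by
  induction l with
  | nil => intro res seen _; rfl
  | cons d l ih =>
      intro res seen hinv
      rw [show pvDedupSeen (d :: l) (res, seen) =
          (if PySem.Set.contains seen d then pvDedupSeen l (res, seen)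
           else pvDedupSeen l (res ++ [d], PySem.Set.add seen d)) from rfl]
      by_cases hc : PySem.Set.contains seen d = true
      · have hd : d ∈ res := (hinv d).mp ((PySem.Set.contains_iff seen d).mp hc)
        rw [if_pos hc, show pvDedupAdd res (d :: l) = pvDedupAdd (if res.contains d then res else res ++ [d]) l from rfl,
            if_pos (List.contains_iff_mem.mpr hd)]
        exact ih res seen hinv
      · have hd : d ∉ res := fun hm => hc ((PySem.Set.contains_iff seen d).mpr ((hinv d).mpr hm))
        rw [if_neg hc, show pvDedupAdd res (d :: l) = pvDedupAdd (if res.contains d then res else res ++ [d]) l from rfl,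
            if_neg (fun hm => hd (List.contains_iff_mem.mp hm))]
        refine ih (res ++ [d]) (PySem.Set.add seen d) (fun x => ?_)
        rw [PySem.Set.mem_add]
        constructor
        · rintro (hx | rfl)
          · exact List.mem_append.mpr (Or.inl ((hinv x).mp hx))
          · simp
        · intro hx
          rcases List.mem_append.mp hx with hx | hx
          · exact Or.inl ((hinv x).mpr hx)
          · simp at hx; exact Or.inr hx

-- the untruncated passes 2–4 (proof vocabulary only)
def pvDedupFold (c : String → Bool) (ds acc : List String) : List String :=
  ds.foldl (fun acc d => if c d && !acc.contains d then acc ++ [d] else acc) acc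

theorem pvDedupFold_prefix (c : String → Bool) (ds : List String) :
    ∀ acc, ∃ t, pvDedupFold c ds acc = acc ++ t := by
  induction ds with
  | nil => intro acc; exact ⟨[], by simp [pvDedupFold]⟩
  | cons d ds ih =>
      intro acc
      by_cases h : (c d && !acc.contains d) = true
      · obtain ⟨t, ht⟩ := ih (acc ++ [d])
        refine ⟨d :: t, ?_⟩
        unfold pvDedupFold at ht ⊢
        rw [List.foldl_cons, if_pos h, ht]
        simp
      · obtain ⟨t, ht⟩ := ih acc
        refine ⟨t, ?_⟩
        unfold pvDedupFold at ht ⊢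
        rw [List.foldl_cons, if_neg h, ht]

theorem pvDedupAdd_cons (acc : List String) (d : String) (l : List String) :
    pvDedupAdd acc (d :: l) = pvDedupAdd (if acc.contains d then acc else acc ++ [d]) l := rfl

theorem pvDedupAdd_mem (acc l : List String) (d : String) (h : d ∈ l ∨ d ∈ acc) :
    d ∈ pvDedupAdd acc l := by
  induction l generalizing acc with
  | nil => simpa [pvDedupAdd] using h.resolve_left (by simp)
  | cons e l ih =>
      rw [pvDedupAdd_cons]
      by_cases hc : acc.contains e = true
      · rw [if_pos hc]
        rcases h with h | h
        · rcases List.mem_cons.mp h with rfl | h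
          · exact ih acc (Or.inr (by simpa using hc))
          · exact ih acc (Or.inl h)
        · exact ih acc (Or.inr h)
      · rw [if_neg hc]
        rcases h with h | h
        · rcases List.mem_cons.mp h with rfl | h
          · exact ih _ (Or.inr (by simp))
          · exact ih _ (Or.inl h)
        · exact ih _ (Or.inr (by simp [h]))

-- pass 1 with its break = filter then take 5
theorem pvPass1_eq (ds : List String) :
    ∀ acc, acc.length < 5 → pvPass1 ds acc = (acc ++ ds.filter pvC1).take 5 := by
  induction ds with
  | nil =>
      intro acc h
      simp [pvPass1, List.take_of_length_le (Nat.le_of_lt h)]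
  | cons d ds ih =>
      intro acc h
      simp only [pvPass1]
      by_cases h1 : pvC1 d = true
      · rw [if_pos h1]
        have hf : (d :: ds).filter pvC1 = d :: ds.filter pvC1 := by simp [h1]
        rw [hf]
        have hassoc : acc ++ d :: ds.filter pvC1 = (acc ++ [d]) ++ ds.filter pvC1 := by simp
        rw [hassoc]
        by_cases h5 : 5 ≤ (acc ++ [d]).length
        · rw [if_pos h5]
          have hlen : (acc ++ [d]).length = 5 := by
            simp at h5 ⊢; omega
          rw [List.take_append_of_le_length (by omega), List.take_of_length_le (by omega)]
        · rw [if_neg h5]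
          exact ih (acc ++ [d]) (by simp at h5 ⊢; omega)
      · rw [if_neg h1]
        have hf : (d :: ds).filter pvC1 = ds.filter pvC1 :=
          List.filter_cons_of_neg (by simp [h1])
        rw [hf, if_neg (by omega : ¬ 5 ≤ acc.length)]
        exact ih acc h

-- passes 2–4 with their break = the untruncated fold then take 5
theorem pvPassDedup_eq (c : String → Bool) (ds : List String) :
    ∀ acc, acc.length ≤ 5 → pvPassDedup c ds acc = (pvDedupFold c ds acc).take 5 := by
  induction ds with
  | nil =>
      intro acc h
      simp [pvPassDedup, pvDedupFold, List.take_of_length_le h]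
  | cons d ds ih =>
      intro acc h
      simp only [pvPassDedup]
      by_cases h5 : 5 ≤ acc.length
      · rw [if_pos h5]
        obtain ⟨t, ht⟩ := pvDedupFold_prefix c (d :: ds) acc
        rw [ht, List.take_append_of_le_length h5, List.take_of_length_le h]
      · rw [if_neg h5]
        have hstep : pvDedupFold c (d :: ds) acc =
            pvDedupFold c ds (if c d && !acc.contains d then acc ++ [d] else acc) := rfl
        rw [hstep]
        apply ih
        by_cases hc : (c d && !acc.contains d) = true
        · rw [if_pos hc]; simp; omega
        · rw [if_neg hc]; omega

-- truncating the accumulator to 5 does not change the first 5 of the fold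
theorem pvDedupFold_take (c : String → Bool) (ds F : List String) :
    (pvDedupFold c ds (F.take 5)).take 5 = (pvDedupFold c ds F).take 5 := by
  by_cases hF : F.length ≤ 5
  · rw [List.take_of_length_le hF]
  · obtain ⟨t, ht⟩ := pvDedupFold_prefix c ds (F.take 5)
    obtain ⟨t', ht'⟩ := pvDedupFold_prefix c ds F
    rw [ht, ht']
    rw [List.take_append_of_le_length (by simp; omega),
        List.take_append_of_le_length (by omega),
        List.take_take]
    simp

-- the conditional fold is the unconditional dedup-append of the filtered list
theorem pvDedupFold_eq_dedupAdd (c : String → Bool) (ds : List String) :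
    ∀ acc, pvDedupFold c ds acc = pvDedupAdd acc (ds.filter c) := by
  induction ds with
  | nil => intro acc; rfl
  | cons d ds ih =>
      intro acc
      have hstep : pvDedupFold c (d :: ds) acc =
          pvDedupFold c ds (if c d && !acc.contains d then acc ++ [d] else acc) := rfl
      by_cases hc : c d = true
      · rw [hstep, List.filter_cons_of_pos hc, pvDedupAdd_cons]
        by_cases hm : acc.contains d = true
        · rw [if_pos hm, if_neg (by simp [hc]; exact List.contains_iff_mem.mp hm), ih]
        · rw [if_neg hm, if_pos (by simp [hc]; exact fun hmem => hm (List.contains_iff_mem.mpr hmem)), ih]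
      · rw [hstep, List.filter_cons_of_neg (by simp [hc]),
            if_neg (by simp [hc]), ih]

-- elements already known to be in acc may be dropped from the list being dedup-appended
theorem pvDedupAdd_skip (p q : String → Bool) (ds : List String) :
    ∀ acc, (∀ d ∈ ds, p d = true → d ∈ acc) →
      pvDedupAdd acc (ds.filter q) = pvDedupAdd acc (ds.filter (fun d => !p d && q d)) := by
  induction ds with
  | nil => intro acc _; rfl
  | cons d ds ih =>
      intro acc hacc
      by_cases hq : q d = true
      · by_cases hp : p d = true
        · rw [List.filter_cons_of_pos hq, List.filter_cons_of_neg (by simp [hp]),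
              pvDedupAdd_cons,
              if_pos (by simp; exact hacc d (by simp) hp)]
          exact ih acc (fun e he hpe => hacc e (by simp [he]) hpe)
        · rw [List.filter_cons_of_pos hq, List.filter_cons_of_pos (by simp [hp, hq]),
              pvDedupAdd_cons, pvDedupAdd_cons]
          by_cases hm : acc.contains d = true
          · rw [if_pos hm]
            exact ih acc (fun e he hpe => hacc e (by simp [he]) hpe)
          · rw [if_neg hm]
            exact ih (acc ++ [d]) (fun e he hpe => by
              simp only [List.mem_append]
              exact Or.inl (hacc e (by simp [he]) hpe))
      · rw [List.filter_cons_of_neg (by simp [hq]),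
            List.filter_cons_of_neg (by simp [hq])]
        exact ih acc (fun e he hpe => hacc e (by simp [he]) hpe)

-- pass-4 variant: nothing filtered, elements known to be in acc dropped
theorem pvDedupAdd_skip_all (p : String → Bool) (ds : List String) :
    ∀ acc, (∀ d ∈ ds, p d = true → d ∈ acc) →
      pvDedupAdd acc ds = pvDedupAdd acc (ds.filter (fun d => !p d)) := by
  intro acc hacc
  have h := pvDedupAdd_skip p (fun _ => true) ds acc hacc
  simpa using h

-- dedup-appending a concatenation = two successive dedup-appends
theorem pvDedupAdd_append (acc l1 l2 : List String) :
    pvDedupAdd acc (l1 ++ l2) = pvDedupAdd (pvDedupAdd acc l1) l2 := by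
  unfold pvDedupAdd; rw [List.foldl_append]

-- bucket pass = four filters
theorem pvBuckets_eq (ds : List String) :
    ∀ b1 b2 b3 b4, pvBuckets ds (b1, b2, b3, b4) =
      (b1 ++ ds.filter pvC1,
       b2 ++ ds.filter (fun d => !pvC1 d && pvC2 d),
       b3 ++ ds.filter (fun d => !pvC1 d && !pvC2 d && pvC3 d),
       b4 ++ ds.filter (fun d => !pvC1 d && !pvC2 d && !pvC3 d)) := by
  induction ds with
  | nil => intro b1 b2 b3 b4; simp [pvBuckets]
  | cons d ds ih =>
      intro b1 b2 b3 b4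
      by_cases h1 : pvC1 d = true
      · rw [show pvBuckets (d :: ds) (b1, b2, b3, b4) =
            pvBuckets ds (b1 ++ [d], b2, b3, b4) by simp [pvBuckets, h1], ih]
        simp [h1]
      · by_cases h2 : pvC2 d = true
        · rw [show pvBuckets (d :: ds) (b1, b2, b3, b4) =
              pvBuckets ds (b1, b2 ++ [d], b3, b4) by simp [pvBuckets, h1, h2], ih]
          simp [h1, h2]
        · by_cases h3 : pvC3 d = true
          · rw [show pvBuckets (d :: ds) (b1, b2, b3, b4) =
                pvBuckets ds (b1, b2, b3 ++ [d], b4) by simp [pvBuckets, h1, h2, h3], ih]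
            simp [h1, h2, h3]
          · rw [show pvBuckets (d :: ds) (b1, b2, b3, b4) =
                pvBuckets ds (b1, b2, b3, b4 ++ [d]) by simp [pvBuckets, h1, h2, h3], ih]
            simp [h1, h2, h3]

-- ===== VERDICT (by name: the statement is the Claim_ definition above) =====
set_option maxHeartbeats 1000000 in
theorem get_critical_devices_spec : Claim_equal_get_critical_devices := by
  intro ds _
  unfold Spec_get_critical_devices get_critical_devices get_critical_devices_alt
  rw [pvBuckets_eq]
  simp only [List.nil_append]
  -- abbreviations
  set b1 := ds.filter pvC1 with hb1
  set b2 := ds.filter (fun d => !pvC1 d && pvC2 d) with hb2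
  set b3 := ds.filter (fun d => !pvC1 d && !pvC2 d && pvC3 d) with hb3
  set b4 := ds.filter (fun d => !pvC1 d && !pvC2 d && !pvC3 d) with hb4
  have hseen : pvDedupSeen (b2 ++ b3 ++ b4) (b1, PySem.Set.ofList b1) =
      pvDedupAdd b1 (b2 ++ b3 ++ b4) :=
    pvDedupSeen_eq _ _ _ (fun x => by simp [PySem.Set.mem_ofList])
  rw [hseen]
  set F2 := pvDedupAdd b1 b2 with hF2d
  set F3 := pvDedupAdd F2 b3 with hF3d
  set F4 := pvDedupAdd F3 b4 with hF4d
  -- full (untruncated) pass 2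
  have hmem1 : ∀ d ∈ ds, pvC1 d = true → d ∈ b1 := by
    intro d hd h; rw [hb1]; exact List.mem_filter.mpr ⟨hd, h⟩
  have hF2 : pvDedupFold pvC2 ds b1 = F2 := by
    rw [pvDedupFold_eq_dedupAdd, pvDedupAdd_skip pvC1 pvC2 ds b1 hmem1]
  -- full pass 3
  have hmem2 : ∀ d ∈ ds, (pvC1 d || pvC2 d) = true → d ∈ F2 := by
    intro d hd h
    by_cases h1 : pvC1 d = true
    · exact pvDedupAdd_mem _ _ _ (Or.inr (hmem1 d hd h1))
    · have h2 : pvC2 d = true := by simp [h1] at h; exact h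
      exact pvDedupAdd_mem _ _ _ (Or.inl (by
        rw [hb2]; exact List.mem_filter.mpr ⟨hd, by simp [h1, h2]⟩))
  have hF3 : pvDedupFold pvC3 ds F2 = F3 := by
    rw [pvDedupFold_eq_dedupAdd,
        pvDedupAdd_skip (fun d => pvC1 d || pvC2 d) pvC3 ds F2 hmem2, hF3d, hb3]
    have hfil : ds.filter (fun d => !(pvC1 d || pvC2 d) && pvC3 d) =
        ds.filter (fun d => !pvC1 d && !pvC2 d && pvC3 d) :=
      List.filter_congr (fun d _ => by cases pvC1 d <;> cases pvC2 d <;> cases pvC3 d <;> rfl)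
    rw [hfil]
  -- full pass 4
  have hmem3 : ∀ d ∈ ds, (pvC1 d || pvC2 d || pvC3 d) = true → d ∈ F3 := by
    intro d hd h
    by_cases h12 : (pvC1 d || pvC2 d) = true
    · exact pvDedupAdd_mem _ _ _ (Or.inr (hmem2 d hd h12))
    · have h3 : pvC3 d = true := by
        simp only [Bool.or_eq_true] at h
        exact h.resolve_left (by simpa using h12)
      have h1 : pvC1 d = false := by cases hh : pvC1 d <;> simp [hh] at h12 ⊢
      have h2 : pvC2 d = false := by cases hh : pvC2 d <;> simp [hh] at h12 ⊢
      exact pvDedupAdd_mem _ _ _ (Or.inl (by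
        rw [hb3]; exact List.mem_filter.mpr ⟨hd, by simp [h1, h2, h3]⟩))
  have hF4 : pvDedupFold (fun _ => true) ds F3 = F4 := by
    rw [pvDedupFold_eq_dedupAdd]
    have : ds.filter (fun _ => true) = ds := by simp
    rw [this, pvDedupAdd_skip_all (fun d => pvC1 d || pvC2 d || pvC3 d) ds F3 hmem3,
        hF4d, hb4]
    have hfil : ds.filter (fun d => !(pvC1 d || pvC2 d || pvC3 d)) =
        ds.filter (fun d => !pvC1 d && !pvC2 d && !pvC3 d) :=
      List.filter_congr (fun d _ => by cases pvC1 d <;> cases pvC2 d <;> cases pvC3 d <;> rfl)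
    rw [hfil]
  -- truncated chain
  have h1 : pvPass1 ds [] = b1.take 5 := by
    rw [pvPass1_eq ds [] (by simp)]; simp [hb1]
  have h2 : pvPassDedup pvC2 ds (pvPass1 ds []) = F2.take 5 := by
    rw [h1, pvPassDedup_eq pvC2 ds _ (List.length_take_le 5 b1),
        pvDedupFold_take, hF2]
  have h3 : pvPassDedup pvC3 ds (pvPassDedup pvC2 ds (pvPass1 ds [])) = F3.take 5 := by
    rw [h2, pvPassDedup_eq pvC3 ds _ (List.length_take_le 5 F2),
        pvDedupFold_take, hF3]
  have h4 : pvPassDedup (fun _ => true) ds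
      (pvPassDedup pvC3 ds (pvPassDedup pvC2 ds (pvPass1 ds []))) = F4.take 5 := by
    rw [h3, pvPassDedup_eq (fun _ => true) ds _ (List.length_take_le 5 F3),
        pvDedupFold_take, hF4]
  rw [h4, List.take_take, pvDedupAdd_append, pvDedupAdd_append, ← hF2d, ← hF3d, ← hF4d]
  simp
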